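-- pv_equiv track=rewrite | github.com/xuwd11/Coursera-Bioinformatics | 63_01_PartialSuffixArray_Naive.py | updateClasses
-- ===== SOURCE A (Python) =====
-- def updateClasses(newOrder, _class, L):
--     n = len(newOrder)
--     newClass = [0] * n
--     newClass[newOrder[0]] = 0
--     for i in range(1, n):
--         curr = newOrder[i]
--         prev = newOrder[i-1]
--         mid = curr + L
--         midPrev = (prev + L) % n
--         if _class[curr] != _class[prev] or _class[mid] != _class[midPrev]:
--             newClass[curr] = newClass[prev] + 1
--         else:
--             newClass[curr] = newClass[prev]
--     return newClass
-- ===== SOURCE B (Python) =====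
-- def updateClasses(newOrder, _class, L):
--     n = len(newOrder)
--     # pass 1: 0/1 flags for ranks 1..n-1 (same comparisons, short-circuit preserved)
--     flags = [1 if _class[newOrder[i]] != _class[newOrder[i - 1]]
--                   or _class[newOrder[i] + L] != _class[(newOrder[i - 1] + L) % n]
--              else 0
--              for i in range(1, n)]
--     # pass 2: prefix-sum the flags into labels by rank
--     labels = [0]
--     for f in flags:
--         labels.append(labels[-1] + f)
--     # pass 3: scatter labels to their suffix positions
--     newClass = [0] * n
--     for pos, lab in zip(newOrder, labels):
--         newClass[pos] = lab
--     return newClass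
-- ===== Notes on version B (the rewrite author's own statement) =====
-- stated objective: simpler
-- what changed: A's single stateful loop, which reads each previous label back out of the output array it is writing, is replaced by three independent passes: a 0/1 flag list over adjacent ranks, a prefix sum of the flags giving the label per rank, and a scatter of the labels to their suffix positions.
import Mathlib
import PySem

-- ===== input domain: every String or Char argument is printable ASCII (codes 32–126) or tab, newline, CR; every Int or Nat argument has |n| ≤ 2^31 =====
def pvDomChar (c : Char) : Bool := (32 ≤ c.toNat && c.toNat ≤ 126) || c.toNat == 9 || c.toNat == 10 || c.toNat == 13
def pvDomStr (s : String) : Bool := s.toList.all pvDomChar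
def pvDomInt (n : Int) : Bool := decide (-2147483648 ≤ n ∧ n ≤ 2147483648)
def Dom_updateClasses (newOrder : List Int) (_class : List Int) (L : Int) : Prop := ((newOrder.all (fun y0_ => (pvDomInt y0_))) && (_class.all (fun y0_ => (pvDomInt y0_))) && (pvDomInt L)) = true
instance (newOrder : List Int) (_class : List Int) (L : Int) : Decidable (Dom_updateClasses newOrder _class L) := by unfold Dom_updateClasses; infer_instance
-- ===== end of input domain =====

-- B replaces A's single stateful loop (which reads each previous label back out of the
-- output array) by three independent passes — flag list, prefix sum, scatter; objective: simpler decomposition.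

-- ===== PORT A =====
def updateClasses (newOrder : List Int) (_class : List Int) (L : Int) : List Int :=
  let n := newOrder.length
  let newClass := List.replicate n (0 : Int)
  let newClass := PySem.List.pySetD newClass (PySem.List.pyGetD newOrder 0 0) 0
  (PySem.List.pyRange 1 (n : Int) 1).foldl (fun nc i =>
    let curr := PySem.List.pyGetD newOrder i 0
    let prev := PySem.List.pyGetD newOrder (i - 1) 0
    let mid := curr + L
    let midPrev := PySem.Int.mod (prev + L) (n : Int)
    if PySem.List.pyGetD _class curr 0 ≠ PySem.List.pyGetD _class prev 0 ∨
       PySem.List.pyGetD _class mid 0 ≠ PySem.List.pyGetD _class midPrev 0 then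
      PySem.List.pySetD nc curr (PySem.List.pyGetD nc prev 0 + 1)
    else
      PySem.List.pySetD nc curr (PySem.List.pyGetD nc prev 0)) newClass

-- ===== PORT B =====
def updateClasses_alt (newOrder : List Int) (_class : List Int) (L : Int) : List Int :=
  let n := newOrder.length
  let flags := (PySem.List.pyRange 1 (n : Int) 1).map (fun i =>
    if PySem.List.pyGetD _class (PySem.List.pyGetD newOrder i 0) 0 ≠
         PySem.List.pyGetD _class (PySem.List.pyGetD newOrder (i - 1) 0) 0 ∨
       PySem.List.pyGetD _class (PySem.List.pyGetD newOrder i 0 + L) 0 ≠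
         PySem.List.pyGetD _class (PySem.Int.mod (PySem.List.pyGetD newOrder (i - 1) 0 + L) (n : Int)) 0
    then (1 : Int) else 0)
  let labels := flags.foldl (fun acc f => acc ++ [PySem.List.pyGetD acc (-1) 0 + f]) [(0 : Int)]
  (newOrder.zip labels).foldl (fun nc pl => PySem.List.pySetD nc pl.1 pl.2) (List.replicate n (0 : Int))

-- ===== PRECONDITION & SPEC =====
-- Pre_ = exactly the inputs on which Python A returns: newOrder nonempty, and every index
-- A actually evaluates (Python's negative-index rule; by or-short-circuit _class[mid] and
-- _class[midPrev] are only read when _class[curr] == _class[prev]) is in range.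
def Pre_updateClasses (newOrder : List Int) (_class : List Int) (L : Int) : Prop :=
  newOrder ≠ [] ∧
  PySem.Raise.InRange newOrder.length (newOrder.getD 0 0) ∧
  ∀ i : Nat, i < newOrder.length → 1 ≤ i →
    PySem.Raise.InRange _class.length (newOrder.getD i 0) ∧
    PySem.Raise.InRange _class.length (newOrder.getD (i - 1) 0) ∧
    PySem.Raise.InRange newOrder.length (newOrder.getD i 0) ∧
    (PySem.List.pyGetD _class (newOrder.getD i 0) 0 = PySem.List.pyGetD _class (newOrder.getD (i - 1) 0) 0 →
      PySem.Raise.InRange _class.length (newOrder.getD i 0 + L) ∧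
      PySem.Raise.InRange _class.length (PySem.Int.mod (newOrder.getD (i - 1) 0 + L) (newOrder.length : Int)))
instance (newOrder : List Int) (_class : List Int) (L : Int) : Decidable (Pre_updateClasses newOrder _class L) := by
  unfold Pre_updateClasses; infer_instance

def pvWitness_updateClasses : List Int × List Int × Int := ([2, 0, 1], [1, 0, 0, 1, 0, 0], 1)

def Spec_updateClasses (newOrder : List Int) (_class : List Int) (L : Int) (out : List Int) : Prop := out = updateClasses_alt newOrder _class L
instance (newOrder : List Int) (_class : List Int) (L : Int) (out : List Int) : Decidable (Spec_updateClasses newOrder _class L out) := by unfold Spec_updateClasses; infer_instance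

-- ===== CLAIM (what is proved, stated in full; the proofs are below) =====
def Claim_equal_updateClasses : Prop := ∀ (newOrder : List Int) (_class : List Int) (L : Int), Dom_updateClasses newOrder _class L → Pre_updateClasses newOrder _class L → Spec_updateClasses newOrder _class L (updateClasses newOrder _class L)

-- ===== LEMMAS AND PROOFS =====

-- the 0/1 flag of rank i (the shared branch condition of both ports)
def pvFlag (no c : List Int) (L : Int) (i : Int) : Int :=
  if PySem.List.pyGetD c (PySem.List.pyGetD no i 0) 0 ≠
       PySem.List.pyGetD c (PySem.List.pyGetD no (i - 1) 0) 0 ∨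
     PySem.List.pyGetD c (PySem.List.pyGetD no i 0 + L) 0 ≠
       PySem.List.pyGetD c (PySem.Int.mod (PySem.List.pyGetD no (i - 1) 0 + L) (no.length : Int)) 0
  then (1 : Int) else 0

-- A's loop body as a named function
def pvStepA (no c : List Int) (L : Int) (nc : List Int) (i : Int) : List Int :=
  let curr := PySem.List.pyGetD no i 0
  let prev := PySem.List.pyGetD no (i - 1) 0
  let mid := curr + L
  let midPrev := PySem.Int.mod (prev + L) (no.length : Int)
  if PySem.List.pyGetD c curr 0 ≠ PySem.List.pyGetD c prev 0 ∨
     PySem.List.pyGetD c mid 0 ≠ PySem.List.pyGetD c midPrev 0 then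
    PySem.List.pySetD nc curr (PySem.List.pyGetD nc prev 0 + 1)
  else
    PySem.List.pySetD nc curr (PySem.List.pyGetD nc prev 0)

theorem pvStepA_eq (no c : List Int) (L : Int) (nc : List Int) (i : Int) :
    pvStepA no c L nc i
      = PySem.List.pySetD nc (PySem.List.pyGetD no i 0)
          (PySem.List.pyGetD nc (PySem.List.pyGetD no (i - 1) 0) 0 + pvFlag no c L i) := by
  unfold pvStepA pvFlag
  dsimp only
  split_ifs with h
  · rfl
  · simp

-- prefix-sum scan characterising B's `labels` loop
def pvScan (a : Int) : List Int → List Int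
  | [] => []
  | f :: fs => (a + f) :: pvScan (a + f) fs

def pvFlags (no c : List Int) (L : Int) : List Int :=
  (PySem.List.pyRange 1 (no.length : Int) 1).map (pvFlag no c L)

def pvLabels (no c : List Int) (L : Int) : List Int := 0 :: pvScan 0 (pvFlags no c L)

-- A's list state just before its loop
def pvInit (no : List Int) : List Int :=
  PySem.List.pySetD (List.replicate no.length (0 : Int)) (PySem.List.pyGetD no 0 0) 0

theorem pvScan_length (a : Int) (fs : List Int) : (pvScan a fs).length = fs.length := by
  induction fs generalizing a with
  | nil => rfl
  | cons f fs ih => simp [pvScan, ih]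

theorem pvFlags_length (no c : List Int) (L : Int) (h : no ≠ []) :
    (pvFlags no c L).length = no.length - 1 := by
  have : no.length ≥ 1 := List.length_pos_iff.mpr h
  simp [pvFlags, PySem.List.length_pyRange_one]

theorem pvLabels_length (no c : List Int) (L : Int) (h : no ≠ []) :
    (pvLabels no c L).length = no.length := by
  have h1 : no.length ≥ 1 := List.length_pos_iff.mpr h
  simp only [pvLabels, List.length_cons, pvScan_length, pvFlags_length no c L h]
  omega

theorem sum_take_succ (l : List Int) (j : Nat) (h : j < l.length) :
    (l.take (j + 1)).sum = (l.take j).sum + l.getD j 0 := by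
  rw [List.getD_eq_getElem l 0 h]
  exact List.sum_take_succ l j h

theorem pvScan_getD (fs : List Int) : ∀ (a : Int) (j : Nat), j < fs.length →
    (pvScan a fs).getD j 0 = a + (fs.take (j + 1)).sum := by
  induction fs with
  | nil => intro a j h; simp at h
  | cons f fs ih =>
    intro a j h
    cases j with
    | zero => simp [pvScan]
    | succ j =>
      simp only [pvScan, List.getD_cons_succ, List.take_succ_cons, List.sum_cons]
      rw [ih (a + f) j (by simpa using h)]
      ring

theorem pvFlags_getD (no c : List Int) (L : Int) (j : Nat) (h : j + 1 < no.length) :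
    (pvFlags no c L).getD j 0 = pvFlag no c L ((j : Int) + 1) := by
  have hlen : (pvFlags no c L).length = no.length - 1 :=
    pvFlags_length no c L (by intro hh; subst hh; simp at h)
  have hj : j < (pvFlags no c L).length := by omega
  rw [List.getD_eq_getElem _ _ hj]
  unfold pvFlags at hj ⊢
  simp only [List.getElem_map]
  congr 1
  rw [PySem.List.getElem_pyRange_one]
  omega

theorem pvLabels_getD_eq_sum (no c : List Int) (L : Int) (j : Nat) (h : j ≤ (pvFlags no c L).length) :
    (pvLabels no c L).getD j 0 = ((pvFlags no c L).take j).sum := by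
  cases j with
  | zero => simp [pvLabels]
  | succ j' =>
    simp only [pvLabels, List.getD_cons_succ]
    rw [pvScan_getD _ _ _ (by omega)]
    simp

theorem pvLabels_rec (no c : List Int) (L : Int) (k : Nat) (h1 : 1 ≤ k) (hk : k < no.length) :
    (pvLabels no c L).getD k 0 = (pvLabels no c L).getD (k - 1) 0 + pvFlag no c L (k : Int) := by
  have hne : no ≠ [] := by intro hh; subst hh; simp at hk
  have hfl : (pvFlags no c L).length = no.length - 1 := pvFlags_length no c L hne
  obtain ⟨j, rfl⟩ : ∃ j, k = j + 1 := ⟨k - 1, by omega⟩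
  have hj : j < (pvFlags no c L).length := by omega
  rw [pvLabels_getD_eq_sum no c L (j+1) (by omega), Nat.add_sub_cancel,
    pvLabels_getD_eq_sum no c L j (by omega), sum_take_succ _ _ hj,
    pvFlags_getD no c L j (by omega)]
  norm_num

theorem idx_some (len : Nat) (i : Int) (h : PySem.Raise.InRange len i) :
    ∃ k : Nat, PySem.List.pyIdx? len i = some k ∧ k < len := by
  simp only [PySem.Raise.InRange] at h
  simp only [PySem.List.pyIdx?]
  split_ifs with h1 h2 <;> first | exact ⟨_, rfl, by omega⟩ | omega

theorem length_setD (xs : List Int) (i v : Int) :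
    (PySem.List.pySetD xs i v).length = xs.length := by
  simp only [PySem.List.pySetD, PySem.List.pySet?]
  cases PySem.List.pyIdx? xs.length i <;> simp

theorem getD_setD_self (xs : List Int) (i v : Int)
    (h : PySem.Raise.InRange xs.length i) :
    PySem.List.pyGetD (PySem.List.pySetD xs i v) i 0 = v := by
  obtain ⟨k, hk, hkl⟩ := idx_some xs.length i h
  simp only [PySem.List.pyGetD, PySem.List.pyGet?, PySem.List.pySetD, PySem.List.pySet?,
    Option.map_some, Option.getD_some, List.length_set, hk, Option.bind_some]
  simp [hkl]

theorem labels_fold (fs : List Int) : ∀ (acc : List Int) (h : acc ≠ []),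
    fs.foldl (fun acc f => acc ++ [PySem.List.pyGetD acc (-1) 0 + f]) acc
      = acc ++ pvScan (acc.getLast h) fs := by
  induction fs with
  | nil => intro acc h; simp [pvScan]
  | cons f fs ih =>
    intro acc h
    have hne : acc ++ [acc.getLast h + f] ≠ [] := by simp
    have : PySem.List.pyGetD acc (-1) 0 = acc.getLast h := PySem.List.pyGetD_neg_one acc 0 h
    simp only [List.foldl_cons, this]
    rw [ih _ hne]
    simp [pvScan]

-- the loop invariant: after processing ranks 1..k-1, A's list equals the scatter of the
-- first k (position, label) pairs, the entry at position newOrder[k-1] holds label k-1,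
-- and the length is unchanged
theorem main_ind (no c : List Int) (L : Int) (hPre : Pre_updateClasses no c L) :
    ∀ k : Nat, 1 ≤ k → k ≤ no.length →
      ((PySem.List.pyRange 1 (k : Int) 1).foldl (pvStepA no c L) (pvInit no)
        = ((no.zip (pvLabels no c L)).take k).foldl
            (fun nc (pl : Int × Int) => PySem.List.pySetD nc pl.1 pl.2)
            (List.replicate no.length (0 : Int)))
      ∧ PySem.List.pyGetD ((PySem.List.pyRange 1 (k : Int) 1).foldl (pvStepA no c L) (pvInit no))
          (no.getD (k - 1) 0) 0 = (pvLabels no c L).getD (k - 1) 0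
      ∧ ((PySem.List.pyRange 1 (k : Int) 1).foldl (pvStepA no c L) (pvInit no)).length = no.length := by
  have hne : no ≠ [] := hPre.1
  have hn1 : 1 ≤ no.length := List.length_pos_iff.mpr hne
  have hzlen : (no.zip (pvLabels no c L)).length = no.length := by
    simp [pvLabels_length no c L hne]
  intro k hk
  induction k, hk using Nat.le_induction with
  | base =>
    intro _
    have hr : PySem.List.pyRange 1 ((1:Nat) : Int) 1 = [] := by
      rw [Nat.cast_one]; exact PySem.List.pyRange_one_eq_nil (by norm_num)
    obtain ⟨n0, rest, rfl⟩ : ∃ n0 rest, no = n0 :: rest := by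
      cases no with | nil => exact absurd rfl hne | cons a b => exact ⟨a, b, rfl⟩
    refine ⟨?_, ?_, ?_⟩
    · rw [hr]
      simp only [List.foldl_nil, pvInit, pvLabels, List.zip_cons_cons, List.take_succ_cons,
        List.take_zero, List.foldl_cons, List.foldl_nil]
      rw [PySem.List.pyGetD_zero]
      rfl
    · rw [hr]
      simp only [List.foldl_nil, pvInit, Nat.sub_self]
      rw [PySem.List.pyGetD_zero]
      have := getD_setD_self (List.replicate (n0 :: rest).length (0:Int)) ((n0 :: rest).getD 0 0) 0
        (by rw [List.length_replicate]; exact hPre.2.1)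
      rw [this]
      rfl
    · rw [hr]
      simp only [List.foldl_nil, pvInit]
      rw [length_setD, List.length_replicate]
  | succ k hk1 ih =>
    intro hkn
    obtain ⟨hEq, hInv, hLen⟩ := ih (by omega)
    have hcast : (((k + 1 : Nat)) : Int) = (k : Int) + 1 := by push_cast; ring
    have hsplit : PySem.List.pyRange 1 (((k + 1 : Nat)) : Int) 1
        = PySem.List.pyRange 1 (k : Int) 1 ++ [(k : Int)] := by
      rw [hcast]; exact PySem.List.pyRange_one_succ_right (by exact_mod_cast hk1)
    have hkm1 : ((k - 1 : Nat) : Int) = (k : Int) - 1 := by omega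
    have hidx : PySem.List.pyGetD no ((k : Int) - 1) 0 = no.getD (k - 1) 0 := by
      rw [← hkm1, PySem.List.pyGetD_natCast]
    have hstep : (PySem.List.pyRange 1 (((k + 1 : Nat)) : Int) 1).foldl (pvStepA no c L) (pvInit no)
        = PySem.List.pySetD ((PySem.List.pyRange 1 (k : Int) 1).foldl (pvStepA no c L) (pvInit no))
            (no.getD k 0) ((pvLabels no c L).getD k 0) := by
      rw [hsplit, List.foldl_append, List.foldl_cons, List.foldl_nil, pvStepA_eq,
        PySem.List.pyGetD_natCast, hidx, hInv, ← pvLabels_rec no c L k hk1 (by omega)]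
    have hk' : k < (no.zip (pvLabels no c L)).length := by omega
    have htake : ((no.zip (pvLabels no c L)).take (k + 1))
        = (no.zip (pvLabels no c L)).take k ++ [(no.getD k 0, (pvLabels no c L).getD k 0)] := by
      rw [List.take_add_one, List.getElem?_eq_getElem hk']
      simp only [Option.toList_some, List.getElem_zip]
      rw [List.getD_eq_getElem no 0 (by omega),
        List.getD_eq_getElem (pvLabels no c L) 0 (by rw [pvLabels_length no c L hne]; omega)]
    have hInRange : PySem.Raise.InRange no.length (no.getD k 0) :=
      (hPre.2.2 k (by omega) hk1).2.2.1
    refine ⟨?_, ?_, ?_⟩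
    · rw [hstep, htake, List.foldl_append, List.foldl_cons, List.foldl_nil, hEq]
    · rw [hstep]
      simp only [Nat.add_sub_cancel]
      exact getD_setD_self _ _ _ (by rw [hLen]; exact hInRange)
    · rw [hstep, length_setD, hLen]

theorem ports_agree (no c : List Int) (L : Int) (hPre : Pre_updateClasses no c L) :
    updateClasses no c L = updateClasses_alt no c L := by
  have hne : no ≠ [] := hPre.1
  have hzlen : (no.zip (pvLabels no c L)).length = no.length := by
    simp [pvLabels_length no c L hne]
  have hA : updateClasses no c L
      = (PySem.List.pyRange 1 (no.length : Int) 1).foldl (pvStepA no c L) (pvInit no) := rfl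
  have hlab : (pvFlags no c L).foldl (fun acc f => acc ++ [PySem.List.pyGetD acc (-1) 0 + f]) [(0:Int)]
      = pvLabels no c L := by
    rw [labels_fold (pvFlags no c L) [(0:Int)] (by simp)]
    rfl
  have hB : updateClasses_alt no c L
      = (no.zip ((pvFlags no c L).foldl (fun acc f => acc ++ [PySem.List.pyGetD acc (-1) 0 + f]) [(0:Int)])).foldl
          (fun nc (pl : Int × Int) => PySem.List.pySetD nc pl.1 pl.2) (List.replicate no.length (0:Int)) := rfl
  rw [hA, hB, hlab]
  have := (main_ind no c L hPre no.length (List.length_pos_iff.mpr hne) le_rfl).1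
  rw [this, ← hzlen, List.take_length]

-- ===== VERDICT (by name: the statement is the Claim_ definition above) =====
theorem updateClasses_spec : Claim_equal_updateClasses := by
  intro no c L _ hPre
  unfold Spec_updateClasses
  exact ports_agree no c L hPre
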